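-- pv_equiv track=rewrite | github.com/ReconHawx/reconhawx | src/api/app/services/protected_domain_similarity_service.py | _typo_suffix_hostnames
-- ===== SOURCE A (Python) =====
-- from typing import Dict, List, Any
--
-- _MAX_LABELS_FOR_SUFFIX_SCAN = 32
--
-- def _typo_suffix_hostnames(typo_fqdn: str) -> List[str]:
--     """
--     All label-boundary suffixes of typo_fqdn with at least two labels.
--     If the hostname has more than _MAX_LABELS_FOR_SUFFIX_SCAN labels, only the last
--     _MAX_LABELS_FOR_SUFFIX_SCAN labels are considered (prefix dropped).
--     """
--     raw = typo_fqdn.lower().strip().rstrip('.')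
--     labels = [p for p in raw.split('.') if p]
--     if not labels:
--         return []
--     if len(labels) > _MAX_LABELS_FOR_SUFFIX_SCAN:
--         labels = labels[-_MAX_LABELS_FOR_SUFFIX_SCAN:]
--     n = len(labels)
--     if n < 2:
--         return [raw]
--     return ['.'.join(labels[i:]) for i in range(0, n - 1)]
-- ===== SOURCE B (Python) =====
-- _MAX_LABELS_FOR_SUFFIX_SCAN = 32
--
-- def _suffix_joins(labels):
--     """Recursively: the '.'-joined suffixes of labels having >= 2 labels, longest first."""
--     if len(labels) < 2:
--         return []
--     rest = _suffix_joins(labels[1:])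
--     tail = rest[0] if rest else labels[1]
--     return [labels[0] + '.' + tail] + rest
--
-- def _from_labels(raw, labels):
--     if not labels:
--         return []
--     if len(labels) > _MAX_LABELS_FOR_SUFFIX_SCAN:
--         labels = labels[len(labels) - _MAX_LABELS_FOR_SUFFIX_SCAN:]
--     if len(labels) < 2:
--         return [raw]
--     return _suffix_joins(labels)
--
-- def _typo_suffix_hostnames(typo_fqdn):
--     raw = typo_fqdn.lower().strip().rstrip('.')
--     return _from_labels(raw, [p for p in raw.split('.') if p])
-- ===== Notes on version B (the rewrite author's own statement) =====
-- stated objective: alternative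
-- what changed: B replaces A's range-indexed comprehension that re-joins the slice labels[i:] for every i by a recursive decomposition: _suffix_joins peels the leftmost label, recursing on the tail and prepending labels[0] plus a dot plus the head of the recursive result, so each suffix string is built from the next shorter one instead of re-joined from scratch; the guard/cap logic lives in a separate _from_labels helper with a nonnegative cap slice.
import Mathlib
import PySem

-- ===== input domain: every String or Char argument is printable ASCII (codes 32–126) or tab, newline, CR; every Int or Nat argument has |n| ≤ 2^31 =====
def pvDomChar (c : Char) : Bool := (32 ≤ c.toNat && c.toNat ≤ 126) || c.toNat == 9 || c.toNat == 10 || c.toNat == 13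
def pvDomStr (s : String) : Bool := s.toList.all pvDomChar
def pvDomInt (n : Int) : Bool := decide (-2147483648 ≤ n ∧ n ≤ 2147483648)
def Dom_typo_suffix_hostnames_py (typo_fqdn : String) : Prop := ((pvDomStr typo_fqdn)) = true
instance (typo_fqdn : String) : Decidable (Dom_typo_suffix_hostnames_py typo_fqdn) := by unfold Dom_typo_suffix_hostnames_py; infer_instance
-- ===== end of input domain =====

-- B replaces A's per-index re-join of labels[i:] by a recursive decomposition that builds
-- each suffix from the next shorter one; objective: alternative.

-- ===== PORT A =====
-- rstrip('.') ported by hand (exact): drop the trailing '.' characters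
def pvRstripDot (l : List Char) : List Char := (l.reverse.dropWhile (fun c => c == '.')).reverse

def typo_suffix_hostnames_py (typo_fqdn : String) : List String :=
  let raw : String := String.ofList (pvRstripDot (PySem.Str.strip (PySem.Str.lower typo_fqdn)).toList)
  let labels := ((PySem.Str.split? raw ".").getD []).filter (fun p => p ≠ "")  -- sep "." ≠ "" so split? is `some`; `if p` = p ≠ ""
  if labels = [] then []
  else
    let labels := if labels.length > 32 then PySem.List.slice labels (some (-32 : Int)) none else labels
    let n := labels.length
    if n < 2 then [raw]
    else (PySem.List.pyRange 0 ((n : Int) - 1) 1).map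
           (fun i => PySem.Str.join "." (PySem.List.slice labels (some i) none))

-- ===== PORT B =====
-- recursive suffix builder of Source B: rest = _suffix_joins(labels[1:]);
-- tail = rest[0] if rest else labels[1]; return [labels[0] + '.' + tail] + rest
def pvSuffixJoins : List String → List String
  | a :: b :: t =>
      let rest := pvSuffixJoins (b :: t)
      (a ++ "." ++ rest.headD b) :: rest
  | _ => []

-- _from_labels(raw, labels) of Source B: the guard/cap logic
def pvFromLabels (raw : String) (labels : List String) : List String :=
  if labels = [] then []
  else
    let labels := if labels.length > 32
      then PySem.List.slice labels (some ((labels.length : Int) - 32)) none  -- labels[len(labels)-32:]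
      else labels
    if labels.length < 2 then [raw]
    else pvSuffixJoins labels

def typo_suffix_hostnames_py_alt (typo_fqdn : String) : List String :=
  let raw : String := String.ofList (pvRstripDot (PySem.Str.strip (PySem.Str.lower typo_fqdn)).toList)
  pvFromLabels raw (((PySem.Str.split? raw ".").getD []).filter (fun p => p ≠ ""))

-- ===== PRECONDITION & SPEC =====
def Spec_typo_suffix_hostnames_py (typo_fqdn : String) (out : List String) : Prop := out = typo_suffix_hostnames_py_alt typo_fqdn
instance (typo_fqdn : String) (out : List String) : Decidable (Spec_typo_suffix_hostnames_py typo_fqdn out) := by unfold Spec_typo_suffix_hostnames_py; infer_instance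

-- ===== CLAIM (what is proved, stated in full; the proofs are below) =====
def Claim_equal_typo_suffix_hostnames_py : Prop := ∀ (typo_fqdn : String), Dom_typo_suffix_hostnames_py typo_fqdn → Spec_typo_suffix_hostnames_py typo_fqdn (typo_suffix_hostnames_py typo_fqdn)

-- ===== LEMMAS AND PROOFS =====

theorem cjoin_cons_of_ne_nil (sep : List Char) (p : List Char) (l : List (List Char)) (h : l ≠ []) :
    PySem.Chars.join sep (p :: l) = p ++ sep ++ PySem.Chars.join sep l := by
  cases l with
  | nil => exact absurd rfl h
  | cons q rest => exact PySem.Chars.join_cons_cons sep p q rest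

theorem join_cons (u : String) (l : List String) (h : l ≠ []) :
    PySem.Str.join "." (u :: l) = u ++ "." ++ PySem.Str.join "." l := by
  apply String.ext
  simp only [PySem.Str.toList_join, List.map_cons, String.toList_append]
  exact cjoin_cons_of_ne_nil _ _ _ (by simpa using h)

theorem join_two (u v : String) : PySem.Str.join "." [u, v] = u ++ "." ++ v := by
  apply String.ext
  simp [PySem.Str.toList_join, PySem.Chars.join_cons_cons, PySem.Chars.join_singleton]

-- Source B's recursion computes exactly the joined drops, longest first
theorem pvSuffixJoins_spec (l : List String) :
    pvSuffixJoins l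
      = (List.range (l.length - 1)).map (fun k => PySem.Str.join "." (l.drop k)) := by
  induction l with
  | nil => simp [pvSuffixJoins]
  | cons a l ih =>
      cases l with
      | nil => simp [pvSuffixJoins]
      | cons b t =>
          show (a ++ "." ++ (pvSuffixJoins (b :: t)).headD b) :: pvSuffixJoins (b :: t) = _
          have hlen : (a :: b :: t).length - 1 = t.length + 1 := by simp
          rw [hlen, List.range_succ_eq_map, List.map_cons, List.map_map, ih]
          have hlen2 : (b :: t).length - 1 = t.length := by simp
          rw [hlen2]
          congr 1
          -- head element (the tail is closed definitionally by congr)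
          cases t with
          | nil => simp [join_two]
          | cons c t' =>
              rw [show (c :: t').length = t'.length + 1 from rfl, List.range_succ_eq_map,
                List.map_cons, List.drop_zero, List.headD_cons, List.drop_zero,
                join_cons a (b :: c :: t') (by simp)]

theorem pyRange_zero_natCast' (m : Nat) :
    PySem.List.pyRange 0 (m : Int) 1 = (List.range m).map (fun k : Nat => (k : Int)) := by
  suffices h : ∀ (m : Nat) (a : Int),
      PySem.List.pyRange a (a + (m : Int)) 1 = (List.range m).map (fun k : Nat => a + (k : Int)) by
    simpa using h m 0
  intro m
  induction m with
  | zero => intro a; simp [PySem.List.pyRange]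
  | succ m ih =>
      intro a
      rw [PySem.List.pyRange_one_cons (by omega), List.range_succ_eq_map, List.map_cons,
        List.map_map, show a + (((m + 1 : Nat)) : Int) = (a + 1) + (m : Int) by push_cast; ring,
        ih (a + 1)]
      congr 1
      · omega
      · apply List.map_congr_left
        intro k _
        simp only [Function.comp]
        push_cast
        ring

-- A's comprehension equals Source B's recursion on the (capped) labels
theorem core (l : List String) (hl : l ≠ []) :
    (PySem.List.pyRange 0 ((l.length : Int) - 1) 1).map
      (fun i => PySem.Str.join "." (PySem.List.slice l (some i) none))
    = pvSuffixJoins l := by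
  have hn : 1 ≤ l.length := List.length_pos_iff.mpr hl
  rw [pvSuffixJoins_spec,
    show ((l.length : Int) - 1) = ((l.length - 1 : Nat) : Int) by omega,
    pyRange_zero_natCast', List.map_map]
  apply List.map_congr_left
  intro k _
  simp [Function.comp, PySem.List.slice_from_natCast]

-- the two spellings of the cap slice agree when length > 32
theorem cap_eq (l : List String) (h : l.length > 32) :
    PySem.List.slice l (some (-32 : Int)) none
      = PySem.List.slice l (some ((l.length : Int) - 32)) none := by
  rw [PySem.List.slice_from_neg_ofNat l 32 (by omega),
    PySem.List.slice_from _ (by omega)]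
  congr 1
  omega

-- A and B share the normalization; guards + generation are compared here
theorem tail_eq (raw : String) (labels : List String) :
    (if labels = [] then ([] : List String)
     else
       let labels2 := if labels.length > 32 then PySem.List.slice labels (some (-32 : Int)) none else labels
       let n := labels2.length
       if n < 2 then [raw]
       else (PySem.List.pyRange 0 ((n : Int) - 1) 1).map
              (fun i => PySem.Str.join "." (PySem.List.slice labels2 (some i) none)))
    = pvFromLabels raw labels := by
  unfold pvFromLabels
  by_cases h0 : labels = []
  · simp only [if_pos h0]
  · simp only [if_neg h0]
    by_cases hc : labels.length > 32
    · simp only [if_pos hc, cap_eq labels hc]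
      set l2 := PySem.List.slice labels (some ((labels.length : Int) - 32)) none
      by_cases h1 : l2.length < 2
      · simp only [if_pos h1]
      · simp only [if_neg h1]; apply core l2
        intro h; rw [h] at h1; simp at h1
    · simp only [if_neg hc]
      by_cases h1 : labels.length < 2
      · simp only [if_pos h1]
      · simp only [if_neg h1]; apply core labels
        intro h; exact h0 h

theorem typo_suffix_hostnames_py_eq (s : String) :
    typo_suffix_hostnames_py s = typo_suffix_hostnames_py_alt s := by
  unfold typo_suffix_hostnames_py typo_suffix_hostnames_py_alt
  exact tail_eq _ _

-- ===== VERDICT (by name: the statement is the Claim_ definition above) =====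
theorem typo_suffix_hostnames_py_spec : Claim_equal_typo_suffix_hostnames_py := by
  intro s _
  unfold Spec_typo_suffix_hostnames_py
  exact typo_suffix_hostnames_py_eq s
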